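-- pv_equiv track=rewrite | github.com/jrigo07/algoritmos | cadenas_combinaciones.py | combinar_variantes
-- ===== SOURCE A (Python) =====
-- def combinar_variantes(contenedor_datos, num_variante_1, num_variante_2, cadena_original):
--     variante_1 = contenedor_datos[num_variante_1][0]
--     variante_2 = contenedor_datos[num_variante_2][0]
--     caracteres_diferentes = [(i, c1) for i, (c1, c3) in enumerate(zip(variante_1, cadena_original)) if c3 != c1]
--     caracteres_diferentes += [(i, c2) for i, (c2, c3) in enumerate(zip(variante_2, cadena_original)) if c2 != c3]
--     nueva_variante_combinada = list(cadena_original)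
--     for indice, caracter in caracteres_diferentes:
--         nueva_variante_combinada[indice] = caracter
--     return ''.join(nueva_variante_combinada)
-- ===== SOURCE B (Python) =====
-- def combinar_variantes(contenedor_datos, num_variante_1, num_variante_2, cadena_original):
--     variante_1 = contenedor_datos[num_variante_1][0]
--     variante_2 = contenedor_datos[num_variante_2][0]
--     resultado = []
--     for i, c in enumerate(cadena_original):
--         if i < len(variante_2) and variante_2[i] != c:
--             resultado.append(variante_2[i])
--         elif i < len(variante_1) and variante_1[i] != c:
--             resultado.append(variante_1[i])
--         else:
--             resultado.append(c)
--     return ''.join(resultado)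
-- ===== Notes on version B (the rewrite author's own statement) =====
-- stated objective: simpler
-- what changed: Instead of materialising two (index,char) difference lists and replaying them onto a mutable copy of the original, B makes one pass over the original and picks each output character directly (variant 2 wins, then variant 1, else the original).
import Mathlib
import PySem

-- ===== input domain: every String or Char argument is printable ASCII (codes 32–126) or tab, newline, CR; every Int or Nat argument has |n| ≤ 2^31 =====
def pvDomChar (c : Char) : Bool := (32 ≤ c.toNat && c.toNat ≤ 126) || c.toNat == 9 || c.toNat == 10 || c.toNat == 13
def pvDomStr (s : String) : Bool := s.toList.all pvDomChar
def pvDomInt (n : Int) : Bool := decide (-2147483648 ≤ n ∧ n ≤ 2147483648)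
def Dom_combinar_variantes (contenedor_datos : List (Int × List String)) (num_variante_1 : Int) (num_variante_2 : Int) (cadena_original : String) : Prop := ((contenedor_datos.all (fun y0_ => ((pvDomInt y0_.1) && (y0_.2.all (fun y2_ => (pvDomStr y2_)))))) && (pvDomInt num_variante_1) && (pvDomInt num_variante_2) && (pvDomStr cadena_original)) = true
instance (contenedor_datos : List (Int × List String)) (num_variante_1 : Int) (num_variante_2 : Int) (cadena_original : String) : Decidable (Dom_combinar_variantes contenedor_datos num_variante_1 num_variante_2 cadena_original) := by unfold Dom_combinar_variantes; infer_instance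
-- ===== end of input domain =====

-- B replaces A's two materialised (index,char) difference lists (replayed onto a mutable copy)
-- by a single direct pass that picks each output character; equivalence of RETURN values is proved
-- on Pre_ (both variant keys present with a nonempty string list, where Python A returns normally).

-- ===== PORT A =====
-- the two difference-list comprehensions of A (indices from enumerate are ≥ 0)
def pvDiffs (v o : List Char) : List (Int × Char) :=
  ((PySem.List.enumerate (v.zip o) 0).filter (fun p => p.2.2 != p.2.1)).map (fun p => (p.1, p.2.1))

-- A's assignment loop 'nueva_variante_combinada[indice] = caracter'; every index produced by
-- pvDiffs is 0 ≤ i < len(o), so Python's list assignment is exactly List.set at i.toNat here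
def pvApply (ds : List (Int × Char)) (arr : List Char) : List Char :=
  ds.foldl (fun a p => a.set p.1.toNat p.2) arr

def combinar_variantes (contenedor_datos : List (Int × List String)) (num_variante_1 : Int) (num_variante_2 : Int) (cadena_original : String) : String :=
  match (PySem.Dict.mk contenedor_datos).get? num_variante_1 with
  | none => ""  -- Python: KeyError (excluded by Pre_)
  | some l1 =>
    match PySem.List.pyGet? l1 0 with
    | none => ""  -- Python: IndexError (excluded by Pre_)
    | some variante_1 =>
      match (PySem.Dict.mk contenedor_datos).get? num_variante_2 with
      | none => ""  -- Python: KeyError (excluded by Pre_)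
      | some l2 =>
        match PySem.List.pyGet? l2 0 with
        | none => ""  -- Python: IndexError (excluded by Pre_)
        | some variante_2 =>
          let caracteres_diferentes :=
            pvDiffs variante_1.toList cadena_original.toList ++
            pvDiffs variante_2.toList cadena_original.toList
          String.ofList (pvApply caracteres_diferentes cadena_original.toList)

-- ===== PORT B =====
-- B's loop body: variant 2's differing character wins, then variant 1's, else the original's
def pvPick (w1 w2 : List Char) (i : Nat) (c : Char) : Char :=
  if (w2[i]?.getD c) ≠ c then w2[i]?.getD c
  else if (w1[i]?.getD c) ≠ c then w1[i]?.getD c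
  else c

def combinar_variantes_alt (contenedor_datos : List (Int × List String)) (num_variante_1 : Int) (num_variante_2 : Int) (cadena_original : String) : String :=
  match (PySem.Dict.mk contenedor_datos).get? num_variante_1 with
  | none => ""  -- Python: KeyError (excluded by Pre_)
  | some l1 =>
    match PySem.List.pyGet? l1 0 with
    | none => ""  -- Python: IndexError (excluded by Pre_)
    | some variante_1 =>
      match (PySem.Dict.mk contenedor_datos).get? num_variante_2 with
      | none => ""  -- Python: KeyError (excluded by Pre_)
      | some l2 =>
        match PySem.List.pyGet? l2 0 with
        | none => ""  -- Python: IndexError (excluded by Pre_)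
        | some variante_2 =>
          String.ofList (cadena_original.toList.mapIdx
            (fun i c => pvPick variante_1.toList variante_2.toList i c))

-- ===== PRECONDITION & SPEC =====
-- Pre_ excludes exactly the inputs where Python A raises: a missing dict key (KeyError) or a
-- present key whose list of strings is empty (IndexError on [0]).
def Pre_combinar_variantes (contenedor_datos : List (Int × List String)) (num_variante_1 : Int) (num_variante_2 : Int) (cadena_original : String) : Prop :=
  (((PySem.Dict.mk contenedor_datos).get? num_variante_1).getD []) ≠ [] ∧
  (((PySem.Dict.mk contenedor_datos).get? num_variante_2).getD []) ≠ []
instance (contenedor_datos : List (Int × List String)) (num_variante_1 : Int) (num_variante_2 : Int) (cadena_original : String) : Decidable (Pre_combinar_variantes contenedor_datos num_variante_1 num_variante_2 cadena_original) := by unfold Pre_combinar_variantes; infer_instance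

def pvWitness_combinar_variantes : (List (Int × List String)) × Int × Int × String :=
  ([(0, ["ab"]), (1, ["zz"])], 0, 1, "xy")

def Spec_combinar_variantes (contenedor_datos : List (Int × List String)) (num_variante_1 : Int) (num_variante_2 : Int) (cadena_original : String) (out : String) : Prop := out = combinar_variantes_alt contenedor_datos num_variante_1 num_variante_2 cadena_original
instance (contenedor_datos : List (Int × List String)) (num_variante_1 : Int) (num_variante_2 : Int) (cadena_original : String) (out : String) : Decidable (Spec_combinar_variantes contenedor_datos num_variante_1 num_variante_2 cadena_original out) := by unfold Spec_combinar_variantes; infer_instance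

-- ===== CLAIM (what is proved, stated in full; the proofs are below) =====
def Claim_equal_combinar_variantes : Prop := ∀ (contenedor_datos : List (Int × List String)) (num_variante_1 : Int) (num_variante_2 : Int) (cadena_original : String), Dom_combinar_variantes contenedor_datos num_variante_1 num_variante_2 cadena_original → Pre_combinar_variantes contenedor_datos num_variante_1 num_variante_2 cadena_original → Spec_combinar_variantes contenedor_datos num_variante_1 num_variante_2 cadena_original (combinar_variantes contenedor_datos num_variante_1 num_variante_2 cadena_original)

-- ===== LEMMAS AND PROOFS =====

theorem pvDiffs_mem (v o : List Char) (p : Int × Char) :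
    p ∈ pvDiffs v o ↔ ∃ (k : Nat), v[k]? = some p.2 ∧ k < o.length ∧ o[k]? ≠ some p.2 ∧ p.1 = (k : Int) := by
  simp only [pvDiffs, List.mem_map, List.mem_filter, PySem.List.mem_enumerate_iff]
  constructor
  · rintro ⟨q, ⟨⟨k, hk, rfl⟩, hne⟩, rfl⟩
    have hkv : k < v.length := lt_of_lt_of_le hk (by simp [List.length_zip])
    have hko : k < o.length := lt_of_lt_of_le hk (by simp [List.length_zip])
    rw [List.getElem_zip] at hne
    refine ⟨k, ?_, hko, ?_, by simp⟩
    · simp [List.getElem_zip, hkv]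
    · simp only [List.getElem_zip]
      simp only [bne_iff_ne, ne_eq] at hne
      simp [List.getElem?_eq_getElem hko]
      exact fun h => hne h
  · rintro ⟨k, hv, hko, hne, hp1⟩
    have hkv : k < v.length := by
      by_contra h
      rw [List.getElem?_eq_none (le_of_not_gt h)] at hv
      simp at hv
    have hvk : v[k] = p.2 := by
      rw [List.getElem?_eq_getElem hkv] at hv
      exact Option.some.inj hv
    have hok : o[k] ≠ p.2 := by
      rw [List.getElem?_eq_getElem hko] at hne
      exact fun h => hne (congrArg some h)
    have hkz : k < (v.zip o).length := by simp [List.length_zip]; omega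
    refine ⟨(0 + (k : Int), (v.zip o)[k]), ⟨⟨k, hkz, rfl⟩, ?_⟩, ?_⟩
    · simp [List.getElem_zip, bne_iff_ne, hvk]
      exact fun h => hok (h ▸ rfl)
    · simp [List.getElem_zip, hvk]
      obtain ⟨p1, p2⟩ := p
      simp at hp1 ⊢
      exact hp1.symm

theorem pvDiffs_pairwise (v o : List Char) :
    (pvDiffs v o).Pairwise (fun p q => p.1 ≠ q.1) := by
  have h := PySem.List.pairwise_lt_enumerate (v.zip o) 0
  have h2 : ((PySem.List.enumerate (v.zip o) 0).filter (fun p => p.2.2 != p.2.1)).Pairwise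
      (fun p q => p.1 < q.1) := h.sublist List.filter_sublist
  have h3 := List.Pairwise.map (fun (p : Int × (Char × Char)) => (p.1, p.2.1))
    (S := fun p q => p.1 < q.1) (fun _ _ hpq => hpq) h2
  exact h3.imp (fun hab => ne_of_lt hab)

theorem pvDiffs_nonneg (v o : List Char) : ∀ p ∈ pvDiffs v o, 0 ≤ p.1 := by
  intro p hp
  obtain ⟨k, _, _, _, hk⟩ := (pvDiffs_mem v o p).1 hp
  omega


theorem pvApply_length (ds : List (Int × Char)) (arr : List Char) :
    (pvApply ds arr).length = arr.length := by
  induction ds generalizing arr with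
  | nil => rfl
  | cons d t ih =>
    rw [show pvApply (d :: t) arr = pvApply t (arr.set d.1.toNat d.2) from rfl]
    rw [ih]; simp

theorem pvApply_getElem?_of_not_mem (ds : List (Int × Char)) (arr : List Char) (j : Nat)
    (h : ∀ p ∈ ds, p.1.toNat ≠ j) :
    (pvApply ds arr)[j]? = arr[j]? := by
  induction ds generalizing arr with
  | nil => rfl
  | cons d t ih =>
    rw [show pvApply (d :: t) arr = pvApply t (arr.set d.1.toNat d.2) from rfl]
    rw [ih (arr.set d.1.toNat d.2) (fun p hp => h p (List.mem_cons_of_mem d hp))]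
    exact List.getElem?_set_ne (h d (List.mem_cons_self))

theorem pvApply_getElem?_of_mem (ds : List (Int × Char)) (arr : List Char) (j : Nat) (c : Char)
    (hnd : ds.Pairwise (fun p q => p.1 ≠ q.1)) (hnn : ∀ p ∈ ds, 0 ≤ p.1)
    (hp : ((j : Int), c) ∈ ds) (hj : j < arr.length) :
    (pvApply ds arr)[j]? = some c := by
  induction ds generalizing arr with
  | nil => cases hp
  | cons d t ih =>
    rcases List.mem_cons.1 hp with h | h
    · subst h
      rw [show pvApply (((j : Int), c) :: t) arr = pvApply t (arr.set (↑j : Int).toNat c) from rfl]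
      rw [pvApply_getElem?_of_not_mem]
      · simp [hj]
      · intro p hpt
        have hne := (List.pairwise_cons.1 hnd).1 p hpt
        have hge := hnn p (List.mem_cons_of_mem _ hpt)
        simp only at hne
        omega
    · rw [show pvApply (d :: t) arr = pvApply t (arr.set d.1.toNat d.2) from rfl]
      exact ih (arr.set d.1.toNat d.2) (List.pairwise_cons.1 hnd).2
        (fun p hpt => hnn p (List.mem_cons_of_mem _ hpt)) h (by simp [hj])

theorem pvApply_diffs_getElem? (v o arr : List Char) (hlen : arr.length = o.length) (j : Nat) :
    (pvApply (pvDiffs v o) arr)[j]? =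
      match v[j]?, o[j]? with
      | some d, some e => if d ≠ e then some d else arr[j]?
      | some _, none => arr[j]?
      | none, _ => arr[j]? := by
  cases hv : v[j]? with
  | none =>
    have hnm : ∀ p ∈ pvDiffs v o, p.1.toNat ≠ j := by
      intro p hp hj
      obtain ⟨k, hk1, hk2, hk3, hk4⟩ := (pvDiffs_mem v o p).1 hp
      have : k = j := by omega
      subst this
      rw [hv] at hk1; simp at hk1
    rw [pvApply_getElem?_of_not_mem _ _ _ hnm]
  | some d =>
    cases ho : o[j]? with
    | none =>
      have hnm : ∀ p ∈ pvDiffs v o, p.1.toNat ≠ j := by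
        intro p hp hj
        obtain ⟨k, hk1, hk2, hk3, hk4⟩ := (pvDiffs_mem v o p).1 hp
        have hkj : k = j := by omega
        subst hkj
        rw [List.getElem?_eq_getElem hk2] at ho
        simp at ho
      rw [pvApply_getElem?_of_not_mem _ _ _ hnm]
    | some e =>
      show (pvApply (pvDiffs v o) arr)[j]? = if d ≠ e then some d else arr[j]?
      by_cases hde : d = e
      · subst hde
        have hnm : ∀ p ∈ pvDiffs v o, p.1.toNat ≠ j := by
          intro p hp hj
          obtain ⟨k, hk1, hk2, hk3, hk4⟩ := (pvDiffs_mem v o p).1 hp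
          have hkj : k = j := by omega
          subst hkj
          rw [hv] at hk1; rw [ho] at hk3
          exact hk3 (hk1.symm ▸ rfl)
        rw [pvApply_getElem?_of_not_mem _ _ _ hnm]
        simp
      · rw [if_pos hde]
        have hjo : j < o.length := by
          by_contra h
          rw [List.getElem?_eq_none (le_of_not_gt h)] at ho
          simp at ho
        refine pvApply_getElem?_of_mem _ _ _ _ (pvDiffs_pairwise v o) (pvDiffs_nonneg v o) ?_ (by omega)
        exact (pvDiffs_mem v o ((j : Int), d)).2 ⟨j, hv, hjo, by rw [ho]; exact fun h => hde (Option.some.inj h).symm, rfl⟩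


theorem pv_main (w1 w2 o : List Char) :
    pvApply (pvDiffs w1 o ++ pvDiffs w2 o) o = o.mapIdx (fun i c => pvPick w1 w2 i c) := by
  have happ : pvApply (pvDiffs w1 o ++ pvDiffs w2 o) o
      = pvApply (pvDiffs w2 o) (pvApply (pvDiffs w1 o) o) := by
    simp [pvApply, List.foldl_append]
  rw [happ]
  have hlen1 : (pvApply (pvDiffs w1 o) o).length = o.length := pvApply_length _ _
  apply List.ext_getElem?
  intro j
  rw [pvApply_diffs_getElem? w2 o _ hlen1 j, pvApply_diffs_getElem? w1 o o rfl j]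
  rw [List.getElem?_mapIdx]
  cases ho : o[j]? with
  | none => cases h2 : w2[j]? <;> cases h1 : w1[j]? <;> simp
  | some e =>
    cases h2 : w2[j]? with
    | none =>
      cases h1 : w1[j]? with
      | none => simp [pvPick, h1, h2]
      | some d1 => simp [pvPick, h1, h2]; split_ifs <;> simp_all
    | some d2 =>
      cases h1 : w1[j]? with
      | none => simp [pvPick, h1, h2]; split_ifs <;> simp_all
      | some d1 => simp [pvPick, h1, h2]; split_ifs <;> simp_all

-- ===== VERDICT (by name: the statement is the Claim_ definition above) =====
theorem combinar_variantes_spec : Claim_equal_combinar_variantes := by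
  intro cd n1 n2 o _ hpre
  unfold Spec_combinar_variantes combinar_variantes combinar_variantes_alt
  obtain ⟨h1, h2⟩ := hpre
  cases hm1 : (PySem.Dict.mk cd).get? n1 with
  | none => simp [hm1] at h1
  | some l1 =>
    simp [hm1] at h1
    cases l1 with
    | nil => simp at h1
    | cons v1 t1 =>
      cases hm2 : (PySem.Dict.mk cd).get? n2 with
      | none => simp [hm2] at h2
      | some l2 =>
        simp [hm2] at h2
        cases l2 with
        | nil => simp at h2
        | cons v2 t2 =>
          simp only [PySem.List.pyGet?_zero_cons]
          rw [pv_main]
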